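-- pv_equiv track=rewrite | github.com/VPoint/PythonExperiments | Labs/search algorithms.py | cherche_m
-- ===== SOURCE A (Python) =====
-- def cherche_m(m, v):
--     NPas = 0
--     for x in m:
--         for y in x:
--             NPas += 1
--             if y == v:
--                 print ("Nombre de pas:", NPas)
--                 return True
--     print ("Nombre de pas:", NPas)
--     return False
-- ===== SOURCE B (Python) =====
-- def cherche_m(m, v):
--     flat = [y for x in m for y in x]
--     if v in flat:
--         print("Nombre de pas:", flat.index(v) + 1)
--         return True
--     print("Nombre de pas:", len(flat))
--     return False
-- ===== Notes on version B (the rewrite author's own statement) =====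
-- stated objective: simpler
-- what changed: A's nested element-by-element loops with a running step counter are replaced by staged passes: flatten the matrix once, then a single membership test on the flat list, with the step count obtained in closed form (flat.index(v)+1 on a hit, len(flat) otherwise).
import Mathlib
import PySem

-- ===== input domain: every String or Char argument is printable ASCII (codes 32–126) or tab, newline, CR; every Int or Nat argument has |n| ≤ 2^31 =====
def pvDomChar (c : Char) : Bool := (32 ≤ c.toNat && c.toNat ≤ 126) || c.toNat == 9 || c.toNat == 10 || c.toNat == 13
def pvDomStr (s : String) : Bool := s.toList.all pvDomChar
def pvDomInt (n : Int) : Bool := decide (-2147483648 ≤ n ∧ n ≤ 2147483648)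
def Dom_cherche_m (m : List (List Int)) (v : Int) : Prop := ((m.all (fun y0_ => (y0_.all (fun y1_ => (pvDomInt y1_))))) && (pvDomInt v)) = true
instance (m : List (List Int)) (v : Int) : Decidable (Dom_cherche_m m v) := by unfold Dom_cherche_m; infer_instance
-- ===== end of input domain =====

-- B flattens the matrix once and does a single search on the flat list (objective: simpler
-- decomposition). Equivalence is about the RETURN value only; both Pythons also print a step count.

-- ===== PORT A =====
-- inner loop: walks row x element by element, incrementing NPas; returns (NPas, found)
def chercheRowA (x : List Int) (v : Int) (nPas : Int) : Int × Bool :=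
  match x with
  | [] => (nPas, false)
  | y :: ys =>
    let nPas := nPas + 1
    if y == v then (nPas, true) else chercheRowA ys v nPas

-- outer loop: rows in order, early return on found
def chercheLoopA (m : List (List Int)) (v : Int) (nPas : Int) : Bool :=
  match m with
  | [] => false
  | x :: xs =>
    let r := chercheRowA x v nPas
    if r.2 then true else chercheLoopA xs v r.1

def cherche_m (m : List (List Int)) (v : Int) : Bool :=
  chercheLoopA m v 0

-- ===== PORT B =====
-- flat = [y for x in m for y in x]; then 'v in flat' decides the result
-- (the printed step count, flat.index(v)+1 or len(flat), does not affect the return value)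
def cherche_m_alt (m : List (List Int)) (v : Int) : Bool :=
  let flat := m.flatMap (fun x => x)
  if flat.contains v then true else false

-- ===== PRECONDITION & SPEC =====
def Spec_cherche_m (m : List (List Int)) (v : Int) (out : Bool) : Prop := out = cherche_m_alt m v
instance (m : List (List Int)) (v : Int) (out : Bool) : Decidable (Spec_cherche_m m v out) := by unfold Spec_cherche_m; infer_instance

-- ===== CLAIM =====
def Claim_equal_cherche_m : Prop := ∀ (m : List (List Int)) (v : Int), Dom_cherche_m m v → Spec_cherche_m m v (cherche_m m v)

-- ===== LEMMAS AND PROOFS =====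
theorem chercheRowA_snd (x : List Int) (v : Int) (n : Int) :
    (chercheRowA x v n).2 = x.contains v := by
  induction x generalizing n with
  | nil => simp [chercheRowA]
  | cons y ys ih =>
    simp only [chercheRowA]
    by_cases hyv : y = v
    · simp [hyv]
    · rw [if_neg (by simpa using hyv), ih]
      simp [Ne.symm hyv]

theorem chercheLoopA_eq_contains_flat (m : List (List Int)) (v : Int) (n : Int) :
    chercheLoopA m v n = (m.flatMap (fun x => x)).contains v := by
  induction m generalizing n with
  | nil => simp [chercheLoopA]
  | cons x xs ih =>
    simp only [chercheLoopA, chercheRowA_snd, List.flatMap_cons]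
    cases hc : x.contains v with
    | true =>
      simp only [List.contains_eq_mem, decide_eq_true_eq] at hc
      simp [hc]
    | false =>
      simp only [List.contains_eq_mem, decide_eq_false_iff_not] at hc
      simp [hc, ih]

-- ===== VERDICT =====
theorem cherche_m_spec : Claim_equal_cherche_m := by
  intro m v _
  unfold Spec_cherche_m cherche_m cherche_m_alt
  simp only [chercheLoopA_eq_contains_flat]
  cases h : (m.flatMap (fun x => x)).contains v <;> simp
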